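-- pv_equiv track=rewrite | github.com/ZackAlatrash/Code-Chunker | trash/build_chunks_v3.py | find_logical_split_point
-- ===== SOURCE A (Python) =====
-- from typing import Any, Dict, List, Optional, Set, Tuple, Union
--
-- def find_logical_split_point(lines: List[str], start: int, target_tokens: int) -> int:
--     """Find a logical split point for Go code blocks."""
--     # Look for logical boundaries: if/else, switch, for/range, defer, etc.
--     keywords = ['if ', 'else', 'switch', 'case', 'for ', 'range', 'defer', 'go func', 'select']
--
--     # Start with a reasonable chunk size
--     end = min(start + 15, len(lines))
--
--     # Look for logical boundaries within the chunk
--     for i in range(start + 5, min(start + 25, len(lines))):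
--         line = lines[i].strip()
--
--         # Check for closing braces that might end a logical block
--         if line == '}' and i > start:
--             # Make sure this isn't the final closing brace
--             if i < len(lines) - 1:
--                 next_line = lines[i + 1].strip()
--                 if next_line and not next_line.startswith('}'):
--                     end = i + 1
--                     break
--
--         # Check for logical block starts
--         for keyword in keywords:
--             if line.startswith(keyword):
--                 # Split before this new block
--                 if i > start + 3:  # Ensure we have some content
--                     end = i
--                     break
--
--     return end
-- ===== SOURCE B (Python) =====
-- def find_logical_split_point(lines, start, target_tokens):
--     """Find a logical split point for Go code blocks (two-pass re-implementation)."""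
--     keywords = ('if ', 'else', 'switch', 'case', 'for ', 'range', 'defer', 'go func', 'select')
--     lo = start + 5
--     hi = min(start + 25, len(lines))
--     # Pass 1: a qualifying closing brace takes absolute priority; first one wins.
--     for i in range(lo, hi):
--         if lines[i].strip() == '}' and i > start and i < len(lines) - 1:
--             nxt = lines[i + 1].strip()
--             if nxt and not nxt.startswith('}'):
--                 return i + 1
--     # Pass 2: otherwise the last keyword-opened block in the window wins.
--     hits = [i for i in range(lo, hi)
--             if i > start + 3 and lines[i].strip().startswith(keywords)]
--     if hits:
--         return hits[-1]
--     return min(start + 15, len(lines))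
-- ===== Notes on version B (the rewrite author's own statement) =====
-- stated objective: alternative
-- what changed: Replaces A's single interleaved loop carrying a mutable `end` (brace check with outer break, inner keyword loop with inner break) by two separate passes over the window with an explicit priority rule: an early-return scan for the first qualifying closing brace, then a comprehension of keyword indices whose last element wins, else the default min(start+15, len).
import Mathlib
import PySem

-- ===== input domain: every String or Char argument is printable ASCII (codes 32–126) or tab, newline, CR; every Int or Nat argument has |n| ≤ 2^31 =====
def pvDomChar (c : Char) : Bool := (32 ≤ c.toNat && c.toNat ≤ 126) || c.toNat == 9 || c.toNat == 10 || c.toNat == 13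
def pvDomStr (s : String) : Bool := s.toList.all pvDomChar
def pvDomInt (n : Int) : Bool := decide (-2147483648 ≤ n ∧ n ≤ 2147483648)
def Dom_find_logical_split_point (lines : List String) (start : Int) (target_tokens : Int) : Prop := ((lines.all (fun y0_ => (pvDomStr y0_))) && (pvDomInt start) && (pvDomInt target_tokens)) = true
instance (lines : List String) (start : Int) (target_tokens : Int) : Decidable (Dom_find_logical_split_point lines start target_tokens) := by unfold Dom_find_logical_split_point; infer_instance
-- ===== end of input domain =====

-- B replaces A's single interleaved loop (mutable `end`, inner keyword loop with break) by two
-- separate passes with an explicit priority rule: first-qualifying-brace wins, else last keyword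
-- index wins (objective: alternative decomposition; not claimed faster).

-- ===== PORT A =====
def pvKeywords : List String :=
  ["if ", "else", "switch", "case", "for ", "range", "defer", "go func", "select"]

-- inner `for keyword in keywords` loop of A (break on a match when i > start + 3)
def pvKwLoop (line : String) (i start e : Int) : List String → Int
  | [] => e
  | k :: ks =>
    if PySem.Str.startswith line k = true then
      (if i > start + 3 then i else pvKwLoop line i start e ks)
    else pvKwLoop line i start e ks

-- outer `for i in range(...)` loop of A, carrying the mutable `end` as e
def pvLoopA (lines : List String) (start : Int) : List Int → Int → Int
  | [], e => e
  | i :: rest, e =>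
    let line := PySem.Str.strip (PySem.List.pyGetD lines i "")
    let brk : Option Int :=
      if line = "}" ∧ i > start then
        if i < (lines.length : Int) - 1 then
          let nxt := PySem.Str.strip (PySem.List.pyGetD lines (i + 1) "")
          if nxt ≠ "" ∧ ¬ PySem.Str.startswith nxt "}" = true then some (i + 1) else none
        else none
      else none
    match brk with
    | some r => r
    | none => pvLoopA lines start rest (pvKwLoop line i start e pvKeywords)

def find_logical_split_point (lines : List String) (start : Int) (target_tokens : Int) : Int :=
  let e := min (start + 15) (lines.length : Int)
  pvLoopA lines start (PySem.List.pyRange (start + 5) (min (start + 25) (lines.length : Int)) 1) e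

-- ===== PORT B =====
-- pass 1 of B: first index whose stripped line is a qualifying closing brace → return i+1
def pvBraceScan (lines : List String) (start : Int) : List Int → Option Int
  | [] => none
  | i :: rest =>
    if PySem.Str.strip (PySem.List.pyGetD lines i "") = "}" ∧ start < i ∧ i < (lines.length : Int) - 1 then
      let nxt := PySem.Str.strip (PySem.List.pyGetD lines (i + 1) "")
      if nxt ≠ "" ∧ ¬ PySem.Str.startswith nxt "}" = true then some (i + 1)
      else pvBraceScan lines start rest
    else pvBraceScan lines start rest

-- filter predicate of B's comprehension (startswith against the keyword tuple = any)
def pvKwCond (lines : List String) (start i : Int) : Bool :=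
  decide (start + 3 < i) &&
    pvKeywords.any (fun k => PySem.Str.startswith (PySem.Str.strip (PySem.List.pyGetD lines i "")) k)

def find_logical_split_point_alt (lines : List String) (start : Int) (target_tokens : Int) : Int :=
  let idxs := PySem.List.pyRange (start + 5) (min (start + 25) (lines.length : Int)) 1
  match pvBraceScan lines start idxs with
  | some r => r
  | none =>
    let hits := idxs.filter (fun i => pvKwCond lines start i)
    match hits.getLast? with
    | some k => k
    | none => min (start + 15) (lines.length : Int)

-- ===== PRECONDITION & SPEC =====
-- Pre_ excludes exactly the inputs where Python A raises IndexError (start < -len(lines) - 5,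
-- where the first loop index already reads below -len); A returns normally everywhere else.
def Pre_find_logical_split_point (lines : List String) (start : Int) (target_tokens : Int) : Prop :=
  -(lines.length : Int) - 5 ≤ start
instance (lines : List String) (start : Int) (target_tokens : Int) : Decidable (Pre_find_logical_split_point lines start target_tokens) := by unfold Pre_find_logical_split_point; infer_instance

def pvWitness_find_logical_split_point : List String × Int × Int := (["a", "}", "b"], 0, 7)

def Spec_find_logical_split_point (lines : List String) (start : Int) (target_tokens : Int) (out : Int) : Prop := out = find_logical_split_point_alt lines start target_tokens
instance (lines : List String) (start : Int) (target_tokens : Int) (out : Int) : Decidable (Spec_find_logical_split_point lines start target_tokens out) := by unfold Spec_find_logical_split_point; infer_instance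

-- ===== CLAIM (what is proved, stated in full; the proofs are below) =====
def Claim_equal_find_logical_split_point : Prop := ∀ (lines : List String) (start : Int) (target_tokens : Int), Dom_find_logical_split_point lines start target_tokens → Pre_find_logical_split_point lines start target_tokens → Spec_find_logical_split_point lines start target_tokens (find_logical_split_point lines start target_tokens)

-- ===== LEMMAS AND PROOFS =====

-- A's inner keyword loop is "i if past start+3 and some keyword matches, else e"
theorem pvKwLoop_eq (line : String) (i start e : Int) (ks : List String) :
    pvKwLoop line i start e ks =
      if (decide (start + 3 < i) && ks.any (fun k => PySem.Str.startswith line k)) = true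
      then i else e := by
  induction ks with
  | nil => simp [pvKwLoop]
  | cons k ks ih =>
    simp only [pvKwLoop, ih, List.any_cons, Bool.and_eq_true, Bool.or_eq_true,
      decide_eq_true_eq]
    split_ifs <;> tauto

theorem getLast?_getD_cons (i e : Int) (l : List Int) :
    ((i :: l).getLast?).getD e = (l.getLast?).getD i := by
  induction l generalizing i e with
  | nil => simp
  | cons a t ih => rw [List.getLast?_cons_cons, ih, ih]

-- "}" starts with no keyword
theorem brace_no_kw : (pvKeywords.any fun k => PySem.Str.startswith "}" k) = false := by
  decide

-- Main loop characterisation: A's interleaved loop = brace scan, then last keyword hit, then e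
theorem pvLoopA_eq (lines : List String) (start : Int) :
    ∀ (idxs : List Int) (e : Int),
      pvLoopA lines start idxs e =
        match pvBraceScan lines start idxs with
        | some r => r
        | none => ((idxs.filter (fun i => pvKwCond lines start i)).getLast?).getD e := by
  intro idxs
  induction idxs with
  | nil => intro e; simp [pvLoopA, pvBraceScan]
  | cons i rest ih =>
    intro e
    simp only [pvLoopA, pvBraceScan, List.filter_cons]
    by_cases hA : PySem.Str.strip (PySem.List.pyGetD lines i "") = "}" ∧ start < i
    · by_cases hC : i < (lines.length : Int) - 1
      · by_cases hD : PySem.Str.strip (PySem.List.pyGetD lines (i + 1) "") ≠ "" ∧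
            ¬ PySem.Str.startswith (PySem.Str.strip (PySem.List.pyGetD lines (i + 1) "")) "}" = true
        · -- the brace break fires in both versions
          rw [if_pos hA, if_pos hC, if_pos hD, if_pos ⟨hA.1, hA.2, hC⟩, if_pos hD]
        · -- brace guard entered but the next-line test fails: line "}" matches no keyword
          have hkw : pvKwCond lines start i = false := by
            unfold pvKwCond; rw [hA.1, brace_no_kw, Bool.and_false]
          rw [if_pos hA, if_pos hC, if_neg hD, if_pos ⟨hA.1, hA.2, hC⟩, if_neg hD,
            pvKwLoop_eq, hA.1, brace_no_kw, Bool.and_false, if_neg (by simp), hkw]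
          simp only [Bool.false_eq_true, if_false]
          exact ih e
      · -- i is the last line: no brace break, keyword path
        have hkw := pvKwLoop_eq (PySem.Str.strip (PySem.List.pyGetD lines i "")) i start e pvKeywords
        rw [if_pos hA, if_neg hC, if_neg (fun hc => hC hc.2.2), pvKwLoop_eq]
        by_cases hk : pvKwCond lines start i = true
        · have hk' : (decide (start + 3 < i) && pvKeywords.any
              (fun k => PySem.Str.startswith (PySem.Str.strip (PySem.List.pyGetD lines i "")) k)) = true := hk
          rw [hk', if_pos rfl, if_pos hk, ih i]
          cases pvBraceScan lines start rest with
          | some r => rfl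
          | none => simp only [getLast?_getD_cons]
        · have hk' : (decide (start + 3 < i) && pvKeywords.any
              (fun k => PySem.Str.startswith (PySem.Str.strip (PySem.List.pyGetD lines i "")) k)) = false := by
            cases h : (decide (start + 3 < i) && pvKeywords.any
              (fun k => PySem.Str.startswith (PySem.Str.strip (PySem.List.pyGetD lines i "")) k)) with
            | false => rfl
            | true => exact absurd h hk
          rw [hk', if_neg (by simp), if_neg hk]
          exact ih e
    · -- stripped line is not "}" (or i ≤ start): keyword path
      rw [if_neg hA, if_neg (fun hc => hA ⟨hc.1, hc.2.1⟩), pvKwLoop_eq]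
      by_cases hk : pvKwCond lines start i = true
      · have hk' : (decide (start + 3 < i) && pvKeywords.any
            (fun k => PySem.Str.startswith (PySem.Str.strip (PySem.List.pyGetD lines i "")) k)) = true := hk
        rw [hk', if_pos rfl, if_pos hk, ih i]
        cases pvBraceScan lines start rest with
        | some r => rfl
        | none => simp only [getLast?_getD_cons]
      · have hk' : (decide (start + 3 < i) && pvKeywords.any
            (fun k => PySem.Str.startswith (PySem.Str.strip (PySem.List.pyGetD lines i "")) k)) = false := by
          cases h : (decide (start + 3 < i) && pvKeywords.any
            (fun k => PySem.Str.startswith (PySem.Str.strip (PySem.List.pyGetD lines i "")) k)) with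
          | false => rfl
          | true => exact absurd h hk
        rw [hk', if_neg (by simp), if_neg hk]
        exact ih e

-- ===== VERDICT (by name: the statement is the Claim_ definition above) =====
theorem find_logical_split_point_spec : Claim_equal_find_logical_split_point := by
  intro lines start target_tokens _ _
  unfold Spec_find_logical_split_point
  simp only [find_logical_split_point, find_logical_split_point_alt]
  rw [pvLoopA_eq]
  cases hbs : pvBraceScan lines start
      (PySem.List.pyRange (start + 5) (min (start + 25) (lines.length : Int)) 1) with
  | some r => rfl
  | none =>
    cases hl : (((PySem.List.pyRange (start + 5) (min (start + 25) (lines.length : Int)) 1)).filter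
        (fun i => pvKwCond lines start i)).getLast? with
    | some k => simp
    | none => simp
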